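-- pv_equiv track=rewrite | github.com/mandy1eigh007/resume-workshop-app | app.py | suggest_transferable_skills_from_text
-- ===== SOURCE A (Python) =====
-- from typing import List, Dict, Any
--
-- SKILL_CANON = [
--     "Problem-solving","Critical thinking","Attention to detail","Time management",
--     "Teamwork & collaboration","Adaptability & willingness to learn","Safety awareness",
--     "Conflict resolution","Customer service","Leadership","Reading blueprints & specs",
--     "Hand & power tools","Materials handling (wood/concrete/metal)","Operating machinery",
--     "Trades math & measurement","Regulatory compliance","Physical stamina & dexterity"
-- ]
--
-- TRANSFERABLE_KEYWORDS = {
--     "problem": "Problem-solving", "solve": "Problem-solving", "troubleshoot": "Problem-solving",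
--     "analyz": "Critical thinking", "priorit": "Time management", "deadline": "Time management",
--     "detail": "Attention to detail", "team": "Teamwork & collaboration", "collabor": "Teamwork & collaboration",
--     "adapt": "Adaptability & willingness to learn", "learn": "Adaptability & willingness to learn",
--     "safety": "Safety awareness", "osha": "Safety awareness", "customer": "Customer service",
--     "lead": "Leadership", "blueprint": "Reading blueprints & specs", "spec": "Reading blueprints & specs",
--     "tool": "Hand & power tools", "drill": "Hand & power tools", "saw": "Hand & power tools",
--     "forklift": "Operating machinery", "material": "Materials handling (wood/concrete/metal)",
--     "machin": "Operating machinery", "math": "Trades math & measurement", "measure": "Trades math & measurement",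
--     "code": "Regulatory compliance", "permit": "Regulatory compliance", "compliance": "Regulatory compliance",
--     "stamina": "Physical stamina & dexterity", "lift": "Physical stamina & dexterity",
-- }
--
-- def suggest_transferable_skills_from_text(text: str) -> List[str]:
--     hits = {}
--     low = (text or "").lower()
--     for kw, skill in TRANSFERABLE_KEYWORDS.items():
--         if kw in low:
--             hits[skill] = hits.get(skill, 0) + 1
--     ordered = [s for s,_ in sorted(hits.items(), key=lambda kv: -kv[1])]
--     canon_order = [s for s in SKILL_CANON if s in ordered]
--     return canon_order[:8]
-- ===== SOURCE B (Python) =====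
-- from typing import List
--
-- # Static table in canonical order: skill -> its trigger keywords.
-- # (Skills with no keywords, like "Conflict resolution", can never be suggested and are omitted.)
-- SKILL_KEYWORDS = [
--     ("Problem-solving", ["problem", "solve", "troubleshoot"]),
--     ("Critical thinking", ["analyz"]),
--     ("Attention to detail", ["detail"]),
--     ("Time management", ["priorit", "deadline"]),
--     ("Teamwork & collaboration", ["team", "collabor"]),
--     ("Adaptability & willingness to learn", ["adapt", "learn"]),
--     ("Safety awareness", ["safety", "osha"]),
--     ("Customer service", ["customer"]),
--     ("Leadership", ["lead"]),
--     ("Reading blueprints & specs", ["blueprint", "spec"]),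
--     ("Hand & power tools", ["tool", "drill", "saw"]),
--     ("Materials handling (wood/concrete/metal)", ["material"]),
--     ("Operating machinery", ["forklift", "machin"]),
--     ("Trades math & measurement", ["math", "measure"]),
--     ("Regulatory compliance", ["code", "permit", "compliance"]),
--     ("Physical stamina & dexterity", ["stamina", "lift"]),
-- ]
--
-- def suggest_transferable_skills_from_text(text: str) -> List[str]:
--     low = (text or "").lower()
--     out = []
--     for skill, kws in SKILL_KEYWORDS:
--         if len(out) == 8:
--             break
--         if any(k in low for k in kws):
--             out.append(skill)
--     return out
-- ===== Notes on version B (the rewrite author's own statement) =====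
-- stated objective: simpler
-- what changed: B replaces A's keyword-dict scan + count dict + sort-by-count + canon-filter pipeline with a static canon-ordered skill->keywords table and one accumulator loop that appends each hit skill and stops at 8.
import Mathlib
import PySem

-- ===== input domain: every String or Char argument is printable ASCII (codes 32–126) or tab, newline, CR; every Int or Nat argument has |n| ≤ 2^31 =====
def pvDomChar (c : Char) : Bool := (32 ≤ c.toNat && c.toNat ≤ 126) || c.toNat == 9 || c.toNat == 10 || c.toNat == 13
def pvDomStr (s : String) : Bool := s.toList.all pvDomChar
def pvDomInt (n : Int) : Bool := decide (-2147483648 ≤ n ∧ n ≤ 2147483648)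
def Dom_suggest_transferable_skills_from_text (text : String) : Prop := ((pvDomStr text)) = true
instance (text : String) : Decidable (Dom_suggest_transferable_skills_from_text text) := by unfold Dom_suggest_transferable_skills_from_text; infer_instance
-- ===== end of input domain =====

-- B drops A's count dict, sort-by-count and canon filter (the counts and sort are dead weight: the
-- canon filter fixes the order) for a static canon-ordered skill→keywords table walked once with an
-- accumulator that stops at 8 hits; same return value, objective: simpler.

-- ===== PORT A =====
def SKILL_CANON : List String := [
  "Problem-solving","Critical thinking","Attention to detail","Time management",
  "Teamwork & collaboration","Adaptability & willingness to learn","Safety awareness",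
  "Conflict resolution","Customer service","Leadership","Reading blueprints & specs",
  "Hand & power tools","Materials handling (wood/concrete/metal)","Operating machinery",
  "Trades math & measurement","Regulatory compliance","Physical stamina & dexterity"]

def TRANSFERABLE_KEYWORDS : List (String × String) := [
  ("problem", "Problem-solving"), ("solve", "Problem-solving"), ("troubleshoot", "Problem-solving"),
  ("analyz", "Critical thinking"), ("priorit", "Time management"), ("deadline", "Time management"),
  ("detail", "Attention to detail"), ("team", "Teamwork & collaboration"), ("collabor", "Teamwork & collaboration"),
  ("adapt", "Adaptability & willingness to learn"), ("learn", "Adaptability & willingness to learn"),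
  ("safety", "Safety awareness"), ("osha", "Safety awareness"), ("customer", "Customer service"),
  ("lead", "Leadership"), ("blueprint", "Reading blueprints & specs"), ("spec", "Reading blueprints & specs"),
  ("tool", "Hand & power tools"), ("drill", "Hand & power tools"), ("saw", "Hand & power tools"),
  ("forklift", "Operating machinery"), ("material", "Materials handling (wood/concrete/metal)"),
  ("machin", "Operating machinery"), ("math", "Trades math & measurement"), ("measure", "Trades math & measurement"),
  ("code", "Regulatory compliance"), ("permit", "Regulatory compliance"), ("compliance", "Regulatory compliance"),
  ("stamina", "Physical stamina & dexterity"), ("lift", "Physical stamina & dexterity")]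

def suggest_transferable_skills_from_text (text : String) : List String :=
  -- hits = {}; low = (text or "").lower()
  let low := PySem.Str.lower (if text == "" then "" else text)
  -- for kw, skill in TRANSFERABLE_KEYWORDS.items(): if kw in low: hits[skill] = hits.get(skill, 0) + 1
  let hits : PySem.Dict String Int := TRANSFERABLE_KEYWORDS.foldl
    (fun h p => if PySem.Str.isIn p.1 low then h.insert p.2 (h.getD p.2 0 + 1) else h)
    PySem.Dict.empty
  -- ordered = [s for s,_ in sorted(hits.items(), key=lambda kv: -kv[1])]
  let ordered := (PySem.List.sorted hits.items (fun kv => -kv.2) false).map (fun kv => kv.1)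
  -- canon_order = [s for s in SKILL_CANON if s in ordered]
  let canon_order := SKILL_CANON.filter (fun s => ordered.contains s)
  -- return canon_order[:8]
  PySem.List.slice canon_order none (some 8)

-- ===== PORT B =====
-- static table in canonical order: skill -> its trigger keywords (keyword-less skills omitted)
def SKILL_KEYWORDS : List (String × List String) := [
  ("Problem-solving", ["problem", "solve", "troubleshoot"]),
  ("Critical thinking", ["analyz"]),
  ("Attention to detail", ["detail"]),
  ("Time management", ["priorit", "deadline"]),
  ("Teamwork & collaboration", ["team", "collabor"]),
  ("Adaptability & willingness to learn", ["adapt", "learn"]),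
  ("Safety awareness", ["safety", "osha"]),
  ("Customer service", ["customer"]),
  ("Leadership", ["lead"]),
  ("Reading blueprints & specs", ["blueprint", "spec"]),
  ("Hand & power tools", ["tool", "drill", "saw"]),
  ("Materials handling (wood/concrete/metal)", ["material"]),
  ("Operating machinery", ["forklift", "machin"]),
  ("Trades math & measurement", ["math", "measure"]),
  ("Regulatory compliance", ["code", "permit", "compliance"]),
  ("Physical stamina & dexterity", ["stamina", "lift"])]

-- the 'for skill, kws in SKILL_KEYWORDS' loop with accumulator 'out' and the break at 8
def pvSkillLoop (low : String) : List (String × List String) → List String → List String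
  | [], out => out
  | (skill, kws) :: rest, out =>
    if out.length == 8 then out
    else if kws.any (fun k => PySem.Str.isIn k low) then pvSkillLoop low rest (out ++ [skill])
    else pvSkillLoop low rest out

def suggest_transferable_skills_from_text_alt (text : String) : List String :=
  let low := PySem.Str.lower (if text == "" then "" else text)
  pvSkillLoop low SKILL_KEYWORDS []

-- ===== PRECONDITION & SPEC =====
def Spec_suggest_transferable_skills_from_text (text : String) (out : List String) : Prop := out = suggest_transferable_skills_from_text_alt text
instance (text : String) (out : List String) : Decidable (Spec_suggest_transferable_skills_from_text text out) := by unfold Spec_suggest_transferable_skills_from_text; infer_instance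

-- ===== CLAIM (what is proved, stated in full; the proofs are below) =====
def Claim_equal_suggest_transferable_skills_from_text : Prop := ∀ (text : String), Dom_suggest_transferable_skills_from_text text → Spec_suggest_transferable_skills_from_text text (suggest_transferable_skills_from_text text)

-- ===== LEMMAS AND PROOFS =====

-- A's count loop: a skill is a key of hits iff some keyword mapped to it occurs in low
theorem mem_keys_hits_loop (c : String → Bool) (s : String) :
    ∀ (l : List (String × String)) (d : PySem.Dict String Int),
      s ∈ (l.foldl (fun h p => if c p.1 then h.insert p.2 (h.getD p.2 0 + 1) else h) d).keys ↔
        s ∈ d.keys ∨ ∃ p ∈ l, p.2 = s ∧ c p.1 = true := by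
  intro l
  induction l with
  | nil => simp
  | cons p t ih =>
    intro d
    by_cases h : c p.1 = true
    · simp [List.foldl_cons, h, ih, PySem.Dict.mem_keys_insert]
      tauto
    · simp [List.foldl_cons, h, ih]

-- A's 'ordered' list: membership in map-fst of the sorted items is membership in the keys
theorem mem_map_fst_sorted (d : PySem.Dict String Int) (key : String × Int → Int) (rev : Bool) (s : String) :
    s ∈ (PySem.List.sorted d.items key rev).map (fun kv => kv.1) ↔ s ∈ d.keys := by
  simp [PySem.List.mem_sorted, PySem.Dict.keys]

-- B's loop = accumulator ++ (take up to 8-|out| of the hit skills, in table order)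
theorem pvSkillLoop_eq (low : String) :
    ∀ (l : List (String × List String)) (out : List String), out.length ≤ 8 →
      pvSkillLoop low l out =
        out ++ ((l.filter (fun p => p.2.any (fun k => PySem.Str.isIn k low))).map
          (fun p => p.1)).take (8 - out.length) := by
  intro l
  induction l with
  | nil => simp [pvSkillLoop]
  | cons p t ih =>
    intro out hle
    obtain ⟨skill, kws⟩ := p
    by_cases h8 : out.length = 8
    · simp [pvSkillLoop, h8]
    · by_cases hm : (kws.any (fun k => PySem.Str.isIn k low)) = true
      · rw [pvSkillLoop, if_neg (by simpa using h8),
          if_pos hm, ih (out ++ [skill]) (by simp; omega),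
          List.filter_cons, if_pos hm, List.map_cons]
        have : 8 - out.length = (8 - (out ++ [skill]).length) + 1 := by simp; omega
        rw [this, List.take_succ_cons]
        simp
      · rw [pvSkillLoop, if_neg (by simpa using h8), if_neg hm, ih out hle,
          List.filter_cons, if_neg hm]

-- the table's skills are exactly the canon skills that own a keyword (closed fact)
theorem skill_keywords_fst :
    SKILL_KEYWORDS.map (fun p => p.1) =
      SKILL_CANON.filter (fun s => TRANSFERABLE_KEYWORDS.any (fun p => p.2 == s)) := by
  decide

-- each table row's keyword list is exactly the keywords mapped to that skill (closed fact)
theorem skill_keywords_kws :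
    ∀ p ∈ SKILL_KEYWORDS,
      p.2 = (TRANSFERABLE_KEYWORDS.filter (fun q => q.2 == p.1)).map (fun q => q.1) := by
  decide

-- ===== VERDICT (by name: the statement is the Claim_ definition above) =====
theorem suggest_transferable_skills_from_text_spec : Claim_equal_suggest_transferable_skills_from_text := by
  intro text _
  unfold Spec_suggest_transferable_skills_from_text
  simp only [suggest_transferable_skills_from_text, suggest_transferable_skills_from_text_alt]
  generalize PySem.Str.lower (if text == "" then "" else text) = low
  rw [pvSkillLoop_eq low SKILL_KEYWORDS [] (by simp)]
  rw [show ((8 : Int)) = ((8 : Nat) : Int) from rfl, PySem.List.slice_to_natCast]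
  simp only [List.nil_append, List.length_nil, Nat.sub_zero]
  refine congrArg (List.take 8) ?_
  -- rewrite A's filter predicate 'ordered.contains s' to the keyword test
  have hfilter : (SKILL_CANON.filter (fun s =>
      ((PySem.List.sorted
          ((TRANSFERABLE_KEYWORDS.foldl
            (fun h p => if PySem.Str.isIn p.1 low then h.insert p.2 (h.getD p.2 0 + 1) else h)
            PySem.Dict.empty).items) (fun kv => -kv.2) false).map (fun kv => kv.1)).contains s)) =
      SKILL_CANON.filter (fun s => TRANSFERABLE_KEYWORDS.any (fun p => p.2 == s && PySem.Str.isIn p.1 low)) := by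
    refine List.filter_congr ?_
    intro s _
    rw [Bool.eq_iff_iff]
    simp only [List.contains_eq_mem, decide_eq_true_eq, mem_map_fst_sorted, List.any_eq_true,
      Bool.and_eq_true, beq_iff_eq]
    rw [mem_keys_hits_loop (fun kw => PySem.Str.isIn kw low) s TRANSFERABLE_KEYWORDS PySem.Dict.empty]
    simp [PySem.Dict.keys_empty]
  rw [hfilter]
  -- split A's predicate: hit = (owns a keyword) && (a keyword occurs)
  have hsplit : SKILL_CANON.filter (fun s => TRANSFERABLE_KEYWORDS.any (fun p => p.2 == s && PySem.Str.isIn p.1 low)) =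
      (SKILL_CANON.filter (fun s => TRANSFERABLE_KEYWORDS.any (fun p => p.2 == s))).filter
        (fun s => TRANSFERABLE_KEYWORDS.any (fun p => p.2 == s && PySem.Str.isIn p.1 low)) := by
    rw [List.filter_filter]
    refine List.filter_congr ?_
    intro s _
    rw [Bool.eq_iff_iff]
    simp only [List.any_eq_true, Bool.and_eq_true, beq_iff_eq]
    constructor
    · rintro ⟨p, hp, hs, hin⟩; exact ⟨⟨p, hp, hs, hin⟩, ⟨p, hp, hs⟩⟩
    · rintro ⟨h, _⟩; exact h
  rw [hsplit, ← skill_keywords_fst, List.filter_map]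
  refine congrArg (List.map _) ?_
  refine List.filter_congr ?_
  intro p hp
  rw [skill_keywords_kws p hp]
  rw [Bool.eq_iff_iff]
  simp only [Function.comp, List.any_eq_true, List.mem_map, List.mem_filter, Bool.and_eq_true,
    beq_iff_eq]
  constructor
  · rintro ⟨q, hq, hs, hin⟩; exact ⟨q.1, ⟨q, ⟨hq, by simp [hs]⟩, rfl⟩, hin⟩
  · rintro ⟨x, ⟨q, ⟨hq, hs⟩, rfl⟩, hin⟩; exact ⟨q, hq, by simpa using hs, hin⟩
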